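-- pv_equiv track=rewrite | github.com/Juan-David-Obando-Novoa/Dalgo-Proyecto-2 | A.NuevoAlgoritmo.py | crearmatrizAdyacencia
-- ===== SOURCE A (Python) =====
-- def crearmatrizAdyacencia(compuestos_fund):
--     n = len(compuestos_fund)
--     matrizAdyacencia = [[0]*n for _ in range(n)]
--     for i in range(n):
--         for j in range(i+1, n):  # Comienza desde i+1 para evitar conexiones bidireccionales
--             if len(compuestos_fund[i]) >= 2 and len(compuestos_fund[j]) >= 2:
--                 if (compuestos_fund[i][0] == compuestos_fund[j][0] or compuestos_fund[i][1] == compuestos_fund[j][1] or compuestos_fund[i][1] == compuestos_fund[j][0] or compuestos_fund[i][0] == compuestos_fund[j][1]):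
--                     matrizAdyacencia[i][j] = 1
--     return matrizAdyacencia
-- ===== SOURCE B (Python) =====
-- def crearmatrizAdyacencia(compuestos_fund):
--     n = len(compuestos_fund)
--     # group compound indices by coordinate value (first two positions)
--     buckets = {}
--     for k in range(n):
--         c = compuestos_fund[k]
--         if len(c) >= 2:
--             vals = (c[0],) if c[0] == c[1] else (c[0], c[1])
--             for v in vals:
--                 buckets.setdefault(v, []).append(k)
--     matrizAdyacencia = [[0] * n for _ in range(n)]
--     for idxs in buckets.values():
--         for x in range(len(idxs)):
--             for y in range(x + 1, len(idxs)):
--                 matrizAdyacencia[idxs[x]][idxs[y]] = 1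
--     return matrizAdyacencia
-- ===== Notes on version B (the rewrite author's own statement) =====
-- stated objective: faster
-- what changed: B builds a dict grouping compound indices by each of their first two coordinate values in one pass, then marks matrix[a][b]=1 for every index pair inside each bucket, so the all-pairs four-way coordinate comparison of A disappears and work is proportional to n plus the number of actually linked pairs (still O(n^2) when one value is shared by everything).
import Mathlib
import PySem

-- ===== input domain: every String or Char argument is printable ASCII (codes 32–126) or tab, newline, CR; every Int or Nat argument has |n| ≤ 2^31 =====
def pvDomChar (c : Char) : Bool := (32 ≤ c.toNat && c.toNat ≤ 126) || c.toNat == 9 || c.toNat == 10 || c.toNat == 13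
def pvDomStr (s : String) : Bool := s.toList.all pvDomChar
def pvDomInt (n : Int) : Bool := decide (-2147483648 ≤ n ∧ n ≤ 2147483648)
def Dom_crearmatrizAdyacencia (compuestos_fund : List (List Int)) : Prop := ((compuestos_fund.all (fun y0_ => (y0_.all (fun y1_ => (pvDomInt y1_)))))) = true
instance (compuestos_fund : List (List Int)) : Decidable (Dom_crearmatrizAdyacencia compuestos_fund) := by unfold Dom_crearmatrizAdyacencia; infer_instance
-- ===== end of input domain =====

-- B replaces A's all-pairs double scan by grouping compound indices into per-coordinate-value
-- buckets (a dict built in one pass) and linking every index pair inside each bucket (objective: alternative).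

-- matriz[i][j] = 1  (shared by both ports)
def pvSetOne (m : List (List Int)) (i j : Nat) : List (List Int) :=
  m.modify i (fun row => row.set j 1)

-- ===== PORT A =====
def crearmatrizAdyacencia (compuestos_fund : List (List Int)) : List (List Int) :=
  let n := compuestos_fund.length
  (List.range n).foldl (fun m i =>
    (List.range' (i+1) (n - (i+1))).foldl (fun m j =>
      if 2 ≤ (compuestos_fund.getD i []).length ∧ 2 ≤ (compuestos_fund.getD j []).length then
        if ((compuestos_fund.getD i []).getD 0 0 = (compuestos_fund.getD j []).getD 0 0 ∨
            (compuestos_fund.getD i []).getD 1 0 = (compuestos_fund.getD j []).getD 1 0 ∨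
            (compuestos_fund.getD i []).getD 1 0 = (compuestos_fund.getD j []).getD 0 0 ∨
            (compuestos_fund.getD i []).getD 0 0 = (compuestos_fund.getD j []).getD 1 0) then
          pvSetOne m i j
        else m
      else m) m)
    (List.replicate n (List.replicate n 0))

-- ===== PORT B =====
-- vals = (c[0],) if c[0] == c[1] else (c[0], c[1])
def pvVals (c : List Int) : List Int :=
  if c.getD 0 0 = c.getD 1 0 then [c.getD 0 0] else [c.getD 0 0, c.getD 1 0]

-- buckets: coordinate value ↦ list of the compound indices containing it
def pvBuckets (l : List (List Int)) : PySem.Dict Int (List Nat) :=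
  (List.range l.length).foldl (fun d k =>
    if 2 ≤ (l.getD k []).length then
      (pvVals (l.getD k [])).foldl (fun d v => d.modify v [] (· ++ [k])) d
    else d) PySem.Dict.empty

def crearmatrizAdyacencia_alt (compuestos_fund : List (List Int)) : List (List Int) :=
  let n := compuestos_fund.length
  (pvBuckets compuestos_fund).values.foldl (fun m idxs =>
    (List.range idxs.length).foldl (fun m x =>
      (List.range' (x+1) (idxs.length - (x+1))).foldl (fun m y =>
        pvSetOne m (idxs.getD x 0) (idxs.getD y 0)) m) m)
    (List.replicate n (List.replicate n 0))

-- ===== PRECONDITION & SPEC =====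
def Spec_crearmatrizAdyacencia (compuestos_fund : List (List Int)) (out : List (List Int)) : Prop := out = crearmatrizAdyacencia_alt compuestos_fund
instance (compuestos_fund : List (List Int)) (out : List (List Int)) : Decidable (Spec_crearmatrizAdyacencia compuestos_fund out) := by unfold Spec_crearmatrizAdyacencia; infer_instance

-- ===== CLAIM (what is proved, stated in full; the proofs are below) =====
def Claim_equal_crearmatrizAdyacencia : Prop := ∀ (compuestos_fund : List (List Int)), Dom_crearmatrizAdyacencia compuestos_fund → Spec_crearmatrizAdyacencia compuestos_fund (crearmatrizAdyacencia compuestos_fund)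

-- ===== LEMMAS AND PROOFS =====

-- canonical n×n matrix given by an entry function
def pvM (n : Nat) (f : Nat → Nat → Int) : List (List Int) :=
  (List.range n).map (fun i => (List.range n).map (fun j => f i j))

-- apply a list of (i, j) ↦ set-to-1 updates
def pvApply (ps : List (Nat × Nat)) (m : List (List Int)) : List (List Int) :=
  ps.foldl (fun m p => pvSetOne m p.1 p.2) m

-- the linking condition of A on a pair of indices
def pvCond (l : List (List Int)) (i j : Nat) : Bool :=
  decide (2 ≤ (l.getD i []).length ∧ 2 ≤ (l.getD j []).length ∧
    ((l.getD i []).getD 0 0 = (l.getD j []).getD 0 0 ∨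
     (l.getD i []).getD 1 0 = (l.getD j []).getD 1 0 ∨
     (l.getD i []).getD 1 0 = (l.getD j []).getD 0 0 ∨
     (l.getD i []).getD 0 0 = (l.getD j []).getD 1 0))

-- index k belongs to the bucket of coordinate value v
def pvInB (l : List (List Int)) (v : Int) (k : Nat) : Bool :=
  decide (2 ≤ (l.getD k []).length ∧ v ∈ pvVals (l.getD k []))

lemma pvInB_iff (l : List (List Int)) (v : Int) (k : Nat) :
    pvInB l v k = true ↔ 2 ≤ (l.getD k []).length ∧ v ∈ pvVals (l.getD k []) := by
  unfold pvInB
  rw [decide_eq_true_eq]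

lemma pvM_congr (n : Nat) (f g : Nat → Nat → Int)
    (h : ∀ i, i < n → ∀ j, j < n → f i j = g i j) : pvM n f = pvM n g := by
  unfold pvM
  apply List.map_congr_left
  intro i hi
  apply List.map_congr_left
  intro j hj
  exact h i (List.mem_range.mp hi) j (List.mem_range.mp hj)

lemma pvSetOne_pvM (n : Nat) (f : Nat → Nat → Int) (a b : Nat) :
    pvSetOne (pvM n f) a b = pvM n (fun i j => if i = a ∧ j = b then 1 else f i j) := by
  unfold pvSetOne pvM
  apply List.ext_getElem
  · simp
  · intro i hi hi'
    rw [List.getElem_modify]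
    simp only [List.getElem_map, List.getElem_range]
    by_cases ha : a = i
    · subst ha
      rw [if_pos rfl]
      apply List.ext_getElem
      · simp
      · intro j hj hj'
        rw [List.getElem_set]
        simp only [List.getElem_map, List.getElem_range]
        split_ifs with h1 h2 h2
        · rfl
        · exact absurd ⟨trivial, h1.symm⟩ h2
        · exact absurd h2.2.symm h1
        · rfl
    · rw [if_neg ha]
      apply List.map_congr_left
      intro j hj
      rw [if_neg (by tauto)]

lemma pvReplicate_eq_pvM (n : Nat) :
    List.replicate n (List.replicate n (0:Int)) = pvM n (fun _ _ => 0) := by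
  unfold pvM
  simp [List.map_const']

lemma pvApply_pvM (ps : List (Nat × Nat)) (n : Nat) (f : Nat → Nat → Int) :
    pvApply ps (pvM n f) = pvM n (fun i j => if (i, j) ∈ ps then 1 else f i j) := by
  induction ps generalizing f with
  | nil => simp [pvApply]
  | cons p ps ih =>
    show pvApply ps (pvSetOne (pvM n f) p.1 p.2) = _
    rw [pvSetOne_pvM, ih]
    apply pvM_congr
    intro i hi j hj
    by_cases h1 : (i, j) ∈ ps <;> by_cases h2 : i = p.1 ∧ j = p.2 <;>
      simp_all [Prod.ext_iff]

lemma pvFoldl_congr {α β : Type} (xs : List β) (f g : α → β → α) (a : α)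
    (h : ∀ m b, f m b = g m b) : xs.foldl f a = xs.foldl g a := by
  have : f = g := funext fun m => funext (h m)
  rw [this]

-- the update list of A (lexicographic pair order)
def pvPsA (l : List (List Int)) : List (Nat × Nat) :=
  (List.range l.length).flatMap (fun i =>
    ((List.range' (i+1) (l.length - (i+1))).filter (fun j => pvCond l i j)).map (fun j => (i, j)))

lemma pvA_eq_apply (l : List (List Int)) :
    crearmatrizAdyacencia l = pvApply (pvPsA l) (List.replicate l.length (List.replicate l.length 0)) := by
  unfold crearmatrizAdyacencia pvApply pvPsA
  rw [List.foldl_flatMap]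
  simp only [List.foldl_map, List.foldl_filter]
  apply pvFoldl_congr
  intro m i
  apply pvFoldl_congr
  intro m' j
  unfold pvCond
  simp only [decide_eq_true_eq]
  split_ifs <;> tauto

lemma pvMem_psA (l : List (List Int)) (i j : Nat) :
    (i, j) ∈ pvPsA l ↔ i < j ∧ j < l.length ∧ pvCond l i j = true := by
  unfold pvPsA
  simp only [List.mem_flatMap, List.mem_map, List.mem_filter, List.mem_range, List.mem_range'_1,
    Prod.mk.injEq]
  constructor
  · rintro ⟨a, ha, b, ⟨⟨hb1, hb2⟩, hc⟩, rfl, rfl⟩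
    exact ⟨by omega, by omega, hc⟩
  · rintro ⟨h1, h2, hc⟩
    exact ⟨i, by omega, j, ⟨⟨by omega, by omega⟩, hc⟩, rfl, rfl⟩

-- all unordered pairs of a bucket list, in B's traversal order
def pvPairsOf (L : List Nat) : List (Nat × Nat) :=
  (List.range L.length).flatMap (fun x =>
    (List.range' (x+1) (L.length - (x+1))).map (fun y => (L.getD x 0, L.getD y 0)))

lemma pvMem_pairsOf (L : List Nat) (hL : L.Pairwise (· < ·)) (i j : Nat) :
    (i, j) ∈ pvPairsOf L ↔ i ∈ L ∧ j ∈ L ∧ i < j := by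
  unfold pvPairsOf
  simp only [List.mem_flatMap, List.mem_map, List.mem_range, List.mem_range'_1, Prod.mk.injEq]
  constructor
  · rintro ⟨x, hx, y, ⟨hy1, hy2⟩, rfl, rfl⟩
    have hy : y < L.length := by omega
    rw [List.getD_eq_getElem L 0 hx, List.getD_eq_getElem L 0 hy]
    refine ⟨List.getElem_mem hx, List.getElem_mem hy, ?_⟩
    exact List.pairwise_iff_getElem.mp hL x y hx hy (by omega)
  · rintro ⟨hi, hj, hij⟩
    obtain ⟨x, hx, rfl⟩ := List.mem_iff_getElem.mp hi
    obtain ⟨y, hy, rfl⟩ := List.mem_iff_getElem.mp hj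
    have hxy : x < y := by
      rcases Nat.lt_trichotomy x y with h | h | h
      · exact h
      · exact absurd hij (by subst h; exact lt_irrefl _)
      · exact absurd (List.pairwise_iff_getElem.mp hL y x hy hx h) (by omega)
    refine ⟨x, hx, y, ⟨by omega, by omega⟩, ?_, ?_⟩
    · rw [List.getD_eq_getElem L 0 hx]
    · rw [List.getD_eq_getElem L 0 hy]

-- the flat (value, index) pair list behind B's bucket-building loop
def pvPairsList (l : List (List Int)) : List (Int × Nat) :=
  (List.range l.length).flatMap (fun k =>
    if 2 ≤ (l.getD k []).length then (pvVals (l.getD k [])).map (fun v => (v, k)) else [])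

lemma pvBuckets_eq_foldl (l : List (List Int)) :
    pvBuckets l = (pvPairsList l).foldl (fun d p => d.modify p.1 [] (· ++ [p.2])) PySem.Dict.empty := by
  unfold pvBuckets pvPairsList
  rw [List.foldl_flatMap]
  apply pvFoldl_congr
  intro d k
  by_cases h : 2 ≤ (l.getD k []).length
  · rw [if_pos h, if_pos h, List.foldl_map]
  · rw [if_neg h, if_neg h, List.foldl_nil]

lemma pvMem_pvVals (c : List Int) (v : Int) :
    v ∈ pvVals c ↔ v = c.getD 0 0 ∨ v = c.getD 1 0 := by
  unfold pvVals
  split_ifs with h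
  · simp only [List.mem_singleton]
    constructor
    · exact fun hv => Or.inl hv
    · rintro (hv | hv)
      · exact hv
      · rw [hv, ← h]
  · simp only [List.mem_cons, List.not_mem_nil, or_false]

lemma pvHead_case' (a b v : Int) (k : Nat)
    (hv : v ∈ (if a = b then [a] else [a, b])) :
    ((((if a = b then [a] else [a, b]) : List Int).map (fun w => (w, k))).filter
        (fun p => p.1 == v)).map (fun x => x.2) = [k] := by
  split_ifs at hv ⊢ with he
  · simp only [List.mem_singleton] at hv
    subst hv
    simp
  · simp only [List.mem_cons] at hv
    have hba : ¬ b = a := fun h => he h.symm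
    rcases hv with hv | hv | hv
    · subst hv; simp [hba]
    · subst hv; simp [he]
    · exact absurd hv (by simp)

lemma pvHead_case (c : List Int) (v : Int) (k : Nat) (hv : v ∈ pvVals c) :
    (((pvVals c).map (fun w => (w, k))).filter (fun p => p.1 == v)).map (fun x => x.2) = [k] := by
  unfold pvVals at hv ⊢
  exact pvHead_case' _ _ _ _ hv

lemma pvHead_nil (c : List Int) (v : Int) (k : Nat) (hv : v ∉ pvVals c) :
    ((pvVals c).map (fun w => (w, k))).filter (fun p => p.1 == v) = [] := by
  rw [List.filter_eq_nil_iff]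
  intro p hm
  obtain ⟨w, hw, rfl⟩ := List.mem_map.mp hm
  simp only [beq_iff_eq]
  exact fun h => hv (h ▸ hw)

lemma pvFilterMap_aux (l : List (List Int)) (v : Int) (ks : List Nat) :
    (((ks.flatMap (fun k =>
        if 2 ≤ (l.getD k []).length then (pvVals (l.getD k [])).map (fun w => (w, k)) else [])).filter
        (fun p => p.1 == v)).map (fun x => x.2)) = ks.filter (fun k => pvInB l v k) := by
  induction ks with
  | nil => rfl
  | cons k ks ih =>
    rw [List.flatMap_cons, List.filter_append, List.map_append, ih, List.filter_cons]
    by_cases h : 2 ≤ (l.getD k []).length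
    · rw [if_pos h]
      by_cases hv : v ∈ pvVals (l.getD k [])
      · have hd : pvInB l v k = true := (pvInB_iff l v k).mpr ⟨h, hv⟩
        rw [hd, if_pos rfl, pvHead_case _ _ _ hv]
        rfl
      · have hd : pvInB l v k = false := by
          rw [Bool.eq_false_iff]
          exact fun hc => hv ((pvInB_iff l v k).mp hc).2
        rw [hd, pvHead_nil _ _ _ hv, List.map_nil, List.nil_append]
        simp only [Bool.false_eq_true, if_false]
    · rw [if_neg h]
      have hd : pvInB l v k = false := by
        rw [Bool.eq_false_iff]
        exact fun hc => h ((pvInB_iff l v k).mp hc).1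
      rw [hd]
      simp only [List.filter_nil, List.map_nil, List.nil_append, Bool.false_eq_true, if_false]

lemma pvBuckets_getD (l : List (List Int)) (v : Int) :
    (pvBuckets l).getD v [] = (List.range l.length).filter (fun k => pvInB l v k) := by
  rw [pvBuckets_eq_foldl]
  unfold pvPairsList
  rw [PySem.Dict.getD_foldl_modify_append, pvFilterMap_aux]
  simp [PySem.Dict.getD_empty]

def pvPsB (l : List (List Int)) : List (Nat × Nat) :=
  (pvBuckets l).values.flatMap pvPairsOf

lemma pvB_eq_apply (l : List (List Int)) :
    crearmatrizAdyacencia_alt l = pvApply (pvPsB l) (List.replicate l.length (List.replicate l.length 0)) := by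
  unfold crearmatrizAdyacencia_alt pvApply pvPsB
  rw [List.foldl_flatMap]
  apply pvFoldl_congr
  intro m L
  unfold pvPairsOf
  rw [List.foldl_flatMap]
  apply pvFoldl_congr
  intro m' x
  rw [List.foldl_map]

lemma pvNodup_keys (l : List (List Int)) : (pvBuckets l).keys.Nodup := by
  rw [pvBuckets_eq_foldl]
  exact PySem.Dict.nodup_keys_foldl_modify_key _ _ _ _ _ (by simp [PySem.Dict.keys_empty])

lemma pvMem_keys (l : List (List Int)) (v : Int) :
    v ∈ (pvBuckets l).keys ↔ ∃ k, k < l.length ∧ pvInB l v k = true := by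
  rw [pvBuckets_eq_foldl, PySem.Dict.keys_foldl_modify_key, PySem.Set.mem_update]
  simp only [PySem.Dict.keys_empty, List.not_mem_nil, false_or]
  unfold pvPairsList
  simp only [List.mem_map, List.mem_flatMap, List.mem_range]
  constructor
  · rintro ⟨p, ⟨k, hk, hp⟩, rfl⟩
    by_cases h : 2 ≤ (l.getD k []).length
    · rw [if_pos h] at hp
      obtain ⟨w, hw, rfl⟩ := List.mem_map.mp hp
      exact ⟨k, hk, (pvInB_iff l _ k).mpr ⟨h, hw⟩⟩
    · rw [if_neg h] at hp
      exact absurd hp (List.not_mem_nil)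
  · rintro ⟨k, hk, hin⟩
    obtain ⟨h1, h2⟩ := (pvInB_iff l v k).mp hin
    exact ⟨(v, k), ⟨k, hk, by rw [if_pos h1]; exact List.mem_map.mpr ⟨v, h2, rfl⟩⟩, rfl⟩

lemma pvMem_psB (l : List (List Int)) (i j : Nat) :
    (i, j) ∈ pvPsB l ↔ i < j ∧ j < l.length ∧ pvCond l i j = true := by
  unfold pvPsB
  rw [List.mem_flatMap]
  have hvals : (pvBuckets l).values = (pvBuckets l).keys.map (fun k => (pvBuckets l).getD k []) :=
    PySem.Dict.values_eq_map_keys _ (pvNodup_keys l) []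
  constructor
  · rintro ⟨L, hL, hmem⟩
    rw [hvals, List.mem_map] at hL
    obtain ⟨v, _, rfl⟩ := hL
    rw [pvBuckets_getD] at hmem
    have hpw : ((List.range l.length).filter (fun k => pvInB l v k)).Pairwise (· < ·) :=
      (List.pairwise_lt_range).sublist List.filter_sublist
    obtain ⟨hi, hj, hij⟩ := (pvMem_pairsOf _ hpw i j).mp hmem
    rw [List.mem_filter, List.mem_range] at hi hj
    obtain ⟨hli, hvi⟩ := (pvInB_iff l v i).mp hi.2
    obtain ⟨hlj, hvj⟩ := (pvInB_iff l v j).mp hj.2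
    refine ⟨hij, hj.1, ?_⟩
    unfold pvCond
    rw [decide_eq_true_eq]
    refine ⟨hli, hlj, ?_⟩
    rcases (pvMem_pvVals _ v).mp hvi with h1 | h1 <;>
      rcases (pvMem_pvVals _ v).mp hvj with h2 | h2 <;>
      rw [← h1, ← h2] <;> tauto
  · rintro ⟨hij, hj, hc⟩
    unfold pvCond at hc
    rw [decide_eq_true_eq] at hc
    obtain ⟨hli, hlj, hshare⟩ := hc
    have hex : ∃ v, v ∈ pvVals (l.getD i []) ∧ v ∈ pvVals (l.getD j []) := by
      rcases hshare with h | h | h | h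
      · exact ⟨(l.getD i []).getD 0 0, (pvMem_pvVals _ _).mpr (Or.inl rfl),
          (pvMem_pvVals _ _).mpr (Or.inl h)⟩
      · exact ⟨(l.getD i []).getD 1 0, (pvMem_pvVals _ _).mpr (Or.inr rfl),
          (pvMem_pvVals _ _).mpr (Or.inr h)⟩
      · exact ⟨(l.getD i []).getD 1 0, (pvMem_pvVals _ _).mpr (Or.inr rfl),
          (pvMem_pvVals _ _).mpr (Or.inl h)⟩
      · exact ⟨(l.getD i []).getD 0 0, (pvMem_pvVals _ _).mpr (Or.inl rfl),
          (pvMem_pvVals _ _).mpr (Or.inr h)⟩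
    obtain ⟨v, hvi, hvj⟩ := hex
    refine ⟨(pvBuckets l).getD v [], ?_, ?_⟩
    · rw [hvals, List.mem_map]
      exact ⟨v, (pvMem_keys l v).mpr ⟨i, by omega, (pvInB_iff l v i).mpr ⟨hli, hvi⟩⟩, rfl⟩
    · rw [pvBuckets_getD]
      have hpw : ((List.range l.length).filter (fun k => pvInB l v k)).Pairwise (· < ·) :=
        (List.pairwise_lt_range).sublist List.filter_sublist
      refine (pvMem_pairsOf _ hpw i j).mpr ⟨?_, ?_, hij⟩
      · rw [List.mem_filter, List.mem_range]
        exact ⟨by omega, (pvInB_iff l v i).mpr ⟨hli, hvi⟩⟩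
      · rw [List.mem_filter, List.mem_range]
        exact ⟨hj, (pvInB_iff l v j).mpr ⟨hlj, hvj⟩⟩

-- ===== VERDICT (by name: the statement is the Claim_ definition above) =====
theorem crearmatrizAdyacencia_spec : Claim_equal_crearmatrizAdyacencia := by
  intro l _
  unfold Spec_crearmatrizAdyacencia
  rw [pvA_eq_apply, pvB_eq_apply, pvReplicate_eq_pvM, pvApply_pvM, pvApply_pvM]
  apply pvM_congr
  intro i hi j hj
  by_cases h : i < j ∧ j < l.length ∧ pvCond l i j = true
  · rw [if_pos ((pvMem_psA l i j).mpr h), if_pos ((pvMem_psB l i j).mpr h)]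
  · rw [if_neg (fun hm => h ((pvMem_psA l i j).mp hm)), if_neg (fun hm => h ((pvMem_psB l i j).mp hm))]
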